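-- pv_equiv track=rewrite | github.com/alexandraback/datacollection | solutions_2692487_0/Python/elockhart/A.py | solve
-- ===== SOURCE A (Python) =====
-- def solve(a, l):
--     if len(l) == 0: return 0
--     if a > l[0]: return solve(a + l[0], l[1:])
--     elif len(l) == 1: return 1
--     elif a == 1: return 99999999999
--     else:
--         d = 0
--         while a <= l[0]:
--             d = d + 1
--             a = a + (a-1)
--         return d + solve(a, l)
-- ===== SOURCE B (Python) =====
-- def solve(a, l):
--     total = 0
--     n = len(l)
--     for i in range(n):
--         m = l[i]
--         if a > m:
--             a += m
--         elif i == n - 1: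
--             return total + 1
--         elif a == 1:
--             return 99999999999
--         else:
--             q = -(-m // (a - 1))          # ceil(m / (a-1))
--             d = (q - 1).bit_length()      # least d with (a-1)*2**d >= m
--             total += d
--             a = (a - 1) * (1 << d) + 1 + m
--     return total
-- ===== Notes on version B (the rewrite author's own statement) =====
-- stated objective: alternative
-- what changed: Replaces A's list-slicing recursion and step-by-step doubling while-loop by a single indexed pass with a running total that computes the number of doublings per element in closed form via ceiling division and bit_length.
-- outside the precondition, e.g. on solve(5, [-3]): A returns 0, B returns 0; on solve(3, [-1, -1]): A returns 0, B returns 0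
import Mathlib
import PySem

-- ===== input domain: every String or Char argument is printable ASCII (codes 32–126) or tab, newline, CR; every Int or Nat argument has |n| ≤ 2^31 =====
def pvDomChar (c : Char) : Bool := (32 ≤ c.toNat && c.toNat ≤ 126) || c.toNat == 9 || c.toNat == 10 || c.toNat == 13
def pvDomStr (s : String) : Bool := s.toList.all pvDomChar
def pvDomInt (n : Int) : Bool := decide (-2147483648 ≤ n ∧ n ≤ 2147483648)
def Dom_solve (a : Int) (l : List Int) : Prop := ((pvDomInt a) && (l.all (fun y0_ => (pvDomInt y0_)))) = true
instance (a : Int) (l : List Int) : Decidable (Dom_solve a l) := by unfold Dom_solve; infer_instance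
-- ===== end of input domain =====

-- B replaces A's slicing recursion and per-step doubling loop by one indexed pass with a
-- closed-form doubling count (ceil-division + bit_length); equivalence is proved on the
-- problem's natural domain Pre_solve (A's return value only; neither version mutates l).

-- ===== PORT A =====
-- the while-loop 'while a <= l[0]: d += 1; a = a + (a-1)'; fuel only makes it total
-- (64 always suffices on Dom ∩ Pre_), returns (d, final a)
def solveLoopA : Nat → Int → Int → Int × Int
  | 0, a, _ => (0, a)
  | fuel + 1, a, m =>
      if a ≤ m then
        let p := solveLoopA fuel (a + (a - 1)) m
        (p.1 + 1, p.2)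
      else (0, a)

-- A's recursion 'return d + solve(a, l)' re-enters with the same list, so the call depth is
-- at most 2*len(l)+1; the fuel argument only makes that recursion structural
def solveFuelA : Nat → Int → List Int → Int
  | 0, _, _ => 0
  | _ + 1, _, [] => 0
  | fuel + 1, a, m :: rest =>
      if a > m then solveFuelA fuel (a + m) rest
      else if rest = [] then 1
      else if a = 1 then 99999999999
      else
        let p := solveLoopA 64 a m
        p.1 + solveFuelA fuel p.2 (m :: rest)

def solve (a : Int) (l : List Int) : Int := solveFuelA (2 * l.length + 1) a l

-- ===== PORT B =====
-- Source B's single indexed pass; 'i == n - 1' is 'rest = []', 'total' is the accumulator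
def solveGoB (a : Int) (l : List Int) (total : Int) : Int :=
  match l with
  | [] => total
  | m :: rest =>
      if a > m then solveGoB (a + m) rest total
      else if rest = [] then total + 1
      else if a = 1 then 99999999999
      else
        let q := -(PySem.Int.floordiv (-m) (a - 1))
        let d := PySem.Int.bitLength (q - 1)
        solveGoB ((a - 1) * 2 ^ d + 1 + m) rest (total + (d : Int))

def solve_alt (a : Int) (l : List Int) : Int := solveGoB a l 0

-- ===== PRECONDITION & SPEC =====
-- Pre_solve restricts to the problem's natural domain (non-negative mote sizes, and a
-- positive starting size when at least two motes remain): outside it A's doubling loop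
-- 'a = a + (a-1)' can run forever (it decreases for a ≤ 0), so A has no value to match;
-- A does still return on some excluded inputs (e.g. negative motes it simply absorbs).
def Pre_solve (a : Int) (l : List Int) : Prop :=
  (∀ x ∈ l, 0 ≤ x) ∧ (2 ≤ l.length → 1 ≤ a)
instance (a : Int) (l : List Int) : Decidable (Pre_solve a l) := by unfold Pre_solve; infer_instance

def pvWitness_solve : Int × List Int := (3, [2, 4, 50])

def Spec_solve (a : Int) (l : List Int) (out : Int) : Prop := out = solve_alt a l
instance (a : Int) (l : List Int) (out : Int) : Decidable (Spec_solve a l out) := by unfold Spec_solve; infer_instance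

-- ===== CLAIM (what is proved, stated in full; the proofs are below) =====
def Claim_equal_solve : Prop := ∀ (a : Int) (l : List Int), Dom_solve a l → Pre_solve a l → Spec_solve a l (solve a l)

-- ===== LEMMAS AND PROOFS =====

-- the closed-form doubling count used by port B (helper for the proofs)
def cnt (a m : Int) : Nat :=
  PySem.Int.bitLength (-(PySem.Int.floordiv (-m) (a - 1)) - 1)

-- ceil(m/b) - 1 = floor((m-1)/b) as a Nat, for 0 < b, 1 <= m
theorem ceil_sub_one (m b : Int) (hb : 0 < b) (hm : 1 ≤ m) :
    -(PySem.Int.floordiv (-m) b) - 1 = (((m - 1).toNat / b.toNat : Nat) : Int) := by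
  set M := (m - 1).toNat with hM
  set B := b.toNat with hB
  set n := M / B with hn
  have hBi : (B : Int) = b := Int.toNat_of_nonneg hb.le
  have hMi : (M : Int) = m - 1 := Int.toNat_of_nonneg (by omega)
  have hdm : (B : Int) * (n : Int) + ((M % B : Nat) : Int) = (M : Int) := by
    exact_mod_cast congrArg (Nat.cast : Nat → Int) (Nat.div_add_mod M B)
  rw [hBi, hMi] at hdm
  have hmod : ((M % B : Nat) : Int) < b := by
    rw [← hBi]; exact_mod_cast Nat.mod_lt _ (by omega)
  have hmod0 : (0 : Int) ≤ ((M % B : Nat) : Int) := by positivity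
  have hq : -(PySem.Int.floordiv (-m) b) = (n : Int) + 1 := by
    rw [PySem.Int.neg_floordiv_neg_eq_iff_of_pos hb]
    constructor
    · have e1 : ((n : Int) + 1 - 1) * b = b * (n : Int) := by ring
      rw [e1]; linarith
    · have e2 : ((n : Int) + 1) * b = b * (n : Int) + b := by ring
      rw [e2]; linarith
  omega

-- when the loop does not run (m < a) the closed-form count is 0
theorem count_zero (a m : Int) (ha : 2 ≤ a) (hm : 1 ≤ m) (h : m ≤ a - 1) :
    cnt a m = 0 := by
  unfold cnt
  rw [ceil_sub_one m (a - 1) (by omega) hm]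
  rw [Nat.div_eq_of_lt (by omega)]
  simp [PySem.Int.bitLength_zero]

-- one doubling peels one bit off the closed-form count
theorem bit_step (a m : Int) (ha : 2 ≤ a) (ham : a ≤ m) :
    cnt a m = cnt (a + (a - 1)) m + 1 := by
  unfold cnt
  have h1 := ceil_sub_one m (a - 1) (by omega) (by omega)
  have h2 := ceil_sub_one m (a + (a - 1) - 1) (by omega) (by omega)
  rw [h1, h2]
  have eB : (a + (a - 1) - 1).toNat = (a - 1).toNat * 2 := by omega
  rw [eB, ← Nat.div_div_eq_div_mul]
  have hpos : 0 < (m - 1).toNat / (a - 1).toNat :=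
    Nat.div_pos (by omega) (by omega)
  exact PySem.Int.bitLength_natCast hpos

-- the while-loop computes exactly the closed-form count, ending at (a-1)*2^cnt + 1
theorem loopA_eq (fuel : Nat) (m : Int) (hm : 2 ≤ m) :
    ∀ a : Int, 2 ≤ a → m ≤ (a - 1) * 2 ^ fuel →
      solveLoopA fuel a m = ((cnt a m : Int), (a - 1) * 2 ^ (cnt a m) + 1) := by
  induction fuel with
  | zero =>
    intro a ha hf
    have h0 : cnt a m = 0 := count_zero a m ha (by omega) (by simpa using hf)
    simp [solveLoopA, h0]
  | succ fuel IH =>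
    intro a ha hf
    by_cases hc : a ≤ m
    · have hf' : m ≤ (a + (a - 1) - 1) * 2 ^ fuel := by
        calc m ≤ (a - 1) * 2 ^ (fuel + 1) := hf
          _ = (a + (a - 1) - 1) * 2 ^ fuel := by ring
      have IH' := IH (a + (a - 1)) (by omega) hf'
      have hstep := bit_step a m ha hc
      simp only [solveLoopA, if_pos hc, IH']
      simp only [Prod.mk.injEq]
      constructor
      · rw [hstep]; push_cast; ring
      · rw [hstep]; ring
    · have h0 : cnt a m = 0 := count_zero a m ha (by omega) (by omega)
      simp [solveLoopA, hc, h0]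

-- the final value of the loop beats m strictly
theorem loop_final_gt (a m : Int) (ha : 2 ≤ a) (hm : 2 ≤ m) :
    m < (a - 1) * 2 ^ (cnt a m) + 1 := by
  have h1 := ceil_sub_one m (a - 1) (by omega) (by omega)
  have hD : (m - 1).toNat / (a - 1).toNat < 2 ^ (cnt a m) := by
    have h2 := PySem.Int.lt_two_pow_bitLength
      ((((m - 1).toNat / (a - 1).toNat : Nat)) : Int)
    have e : cnt a m
        = PySem.Int.bitLength ((((m - 1).toNat / (a - 1).toNat : Nat)) : Int) := by
      unfold cnt; rw [h1]
    rw [e]; simpa using h2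
  have hm' : (m - 1).toNat < 2 ^ (cnt a m) * (a - 1).toNat :=
    (Nat.div_lt_iff_lt_mul (by omega)).1 hD
  have h3 : (m - 1 : Int) < 2 ^ (cnt a m) * (a - 1) := by
    have hcast : ((m - 1).toNat : Int) = m - 1 := Int.toNat_of_nonneg (by omega)
    calc (m - 1 : Int) = ((m - 1).toNat : Int) := hcast.symm
      _ < ((2 ^ (cnt a m) * (a - 1).toNat : Nat) : Int) := by exact_mod_cast hm'
      _ = 2 ^ (cnt a m) * (a - 1) := by
          push_cast [Int.toNat_of_nonneg (show (0 : Int) ≤ a - 1 by omega)]; ring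
  rw [mul_comm] at h3; linarith

-- the inner fuel of 64 always suffices on the admitted inputs
theorem fuel64 (a m : Int) (ha : 2 ≤ a) (hm : m ≤ 2147483648) :
    m ≤ (a - 1) * 2 ^ (64 : Nat) := by
  calc m ≤ 2147483648 := hm
    _ ≤ 2 ^ (64 : Nat) := by norm_num
    _ = 1 * 2 ^ (64 : Nat) := by ring
    _ ≤ (a - 1) * 2 ^ (64 : Nat) :=
        mul_le_mul_of_nonneg_right (by omega) (by positivity)

theorem main_lemma (fuel : Nat) :
    ∀ (l : List Int) (a t : Int),
      2 * l.length + 1 ≤ fuel → 1 ≤ a → (a = 1 → t = 0) →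
      (∀ x ∈ l, 0 ≤ x ∧ x ≤ 2147483648) →
      solveFuelA fuel a l + t = solveGoB a l t := by
  induction fuel using Nat.strong_induction_on with
  | _ fuel IH =>
    intro l a t hfuel ha ht hl
    match fuel, l with
    | fuel + 1, [] => simp [solveFuelA, solveGoB]
    | fuel + 1, m :: rest =>
      have hm0 := (hl m (by simp)).1
      have hm31 := (hl m (by simp)).2
      by_cases hgt : a > m
      · simp only [solveFuelA, solveGoB, if_pos hgt]
        exact IH fuel (by omega) rest (a + m) t (by simp at hfuel ⊢; omega)
          (by omega) (fun h => ht (by omega)) (fun x hx => hl x (by simp [hx]))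
      · by_cases hrest : rest = []
        · subst hrest
          simp [solveFuelA, solveGoB, hgt]
          omega
        · by_cases ha1 : a = 1
          · have ht0 := ht ha1
            have hm1 : ¬ m < (1 : Int) := by omega
            simp [solveFuelA, solveGoB, hrest, ha1, ht0, hm1]
          · have ha2 : 2 ≤ a := by omega
            have hm2 : 2 ≤ m := by omega
            have hloop := loopA_eq 64 m hm2 a ha2 (fuel64 a m ha2 hm31)
            have hgtD := loop_final_gt a m ha2 hm2
            obtain ⟨fuel', rfl⟩ : ∃ f', fuel = f' + 1 :=
              ⟨fuel - 1, by simp at hfuel; omega⟩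
            have hlen : 2 * rest.length + 1 ≤ fuel' := by simp at hfuel; omega
            have eA : solveFuelA (fuel' + 1 + 1) a (m :: rest)
                = (cnt a m : Int)
                  + solveFuelA fuel' ((a - 1) * 2 ^ (cnt a m) + 1 + m) rest := by
              simp only [solveFuelA, if_neg hgt, if_neg hrest, if_neg ha1, hloop]
              simp only [if_pos hgtD]
            have eB : solveGoB a (m :: rest) t
                = solveGoB ((a - 1) * 2 ^ (cnt a m) + 1 + m) rest (t + (cnt a m : Int)) := by
              simp only [solveGoB, if_neg hgt, if_neg hrest, if_neg ha1]
              rfl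
            rw [eA, eB]
            have hprod : (0 : Int) < (a - 1) * 2 ^ (cnt a m) :=
              mul_pos (by omega) (pow_pos (by norm_num) _)
            have hIH := IH fuel' (by omega) rest ((a - 1) * 2 ^ (cnt a m) + 1 + m)
              (t + (cnt a m : Int)) hlen
              (by linarith)
              (by intro h; exfalso; linarith)
              (fun x hx => hl x (by simp [hx]))
            linarith [hIH]

-- ===== VERDICT (by name: the statement is the Claim_ definition above) =====
theorem solve_spec : Claim_equal_solve := by
  unfold Claim_equal_solve
  intro a l hdom hpre
  unfold Spec_solve solve solve_alt
  obtain ⟨hpos, hlen⟩ := hpre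
  have hdom' : ∀ x ∈ l, 0 ≤ x ∧ x ≤ 2147483648 := by
    intro x hx
    refine ⟨hpos x hx, ?_⟩
    unfold Dom_solve at hdom
    simp [pvDomInt, List.all_eq_true] at hdom
    exact (hdom.2 x hx).2
  by_cases ha : 1 ≤ a
  · have := main_lemma (2 * l.length + 1) l a 0 (le_refl _) ha (fun _ => rfl) hdom'
    omega
  · match l, hlen with
    | [], _ => simp [solveFuelA, solveGoB]
    | [m], _ =>
      have : ¬ a > m := by have := hpos m (by simp); omega
      simp [solveFuelA, solveGoB, this]
    | m :: m' :: rest, hlen =>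
      exact absurd (hlen (by simp only [List.length_cons]; omega)) (by omega)
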